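-- pv_equiv track=rewrite | github.com/kevin-carrier/CodedDualAttack | verifyModel/ScoreExperimentalDistribution/utilitary.py | equalize_and_sum
-- ===== SOURCE A (Python) =====
-- def equalize_and_sum(L_L):
-- 	max_length = max([len(L) for L in L_L])
-- 	for L in L_L:
-- 		L += [0]*(max_length - len(L))
-- 	L_final = [0]*max_length
-- 	for L in L_L:
-- 		for i in range(len(L)):
-- 			L_final[i] += L[i]
-- 	return L_final
-- ===== SOURCE B (Python) =====
-- def equalize_and_sum(L_L):
--     # Running-total pairwise merge: fold rows with a ragged element-wise add.
--     # No max-length computation, no padding, inputs are not mutated.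
--     def add(xs, ys):
--         if len(xs) < len(ys):
--             xs, ys = ys, xs
--         return [x + y for x, y in zip(xs, ys)] + xs[len(ys):]
--     acc = list(L_L[0])
--     for L in L_L[1:]:
--         acc = add(acc, L)
--     return acc
-- ===== Notes on version B (the rewrite author's own statement) =====
-- stated objective: alternative
-- what changed: Instead of computing the max length, padding every row and accumulating into a preallocated L_final, B folds the rows with a ragged pairwise addition (zip the overlap, keep the longer tail), so no max pass, no padding and no mutation of the inputs; return-value equivalence only, since A pads its inner lists in place and B does not.
import Mathlib
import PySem

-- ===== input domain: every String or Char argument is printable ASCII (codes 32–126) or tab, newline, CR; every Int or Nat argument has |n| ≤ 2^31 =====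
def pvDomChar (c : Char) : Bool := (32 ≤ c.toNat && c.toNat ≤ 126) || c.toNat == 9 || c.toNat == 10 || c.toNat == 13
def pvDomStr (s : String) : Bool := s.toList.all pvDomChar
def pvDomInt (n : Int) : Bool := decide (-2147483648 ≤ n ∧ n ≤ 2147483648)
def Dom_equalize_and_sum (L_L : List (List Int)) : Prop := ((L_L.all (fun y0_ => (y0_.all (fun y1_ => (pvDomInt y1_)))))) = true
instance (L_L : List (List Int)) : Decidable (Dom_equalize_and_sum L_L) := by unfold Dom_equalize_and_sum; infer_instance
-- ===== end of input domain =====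

-- B folds the rows with a ragged pairwise addition (zip the overlap, append the longer
-- tail) instead of A's max-length pass, in-place padding and accumulation into a
-- preallocated L_final; return-value equivalence only: A pads its inner lists in place, B does not mutate.

-- ===== PORT A =====
-- A-side helpers: the body of the inner loop 'L_final[i] += L[i]' and the inner loop itself
def pvStep (L Lf : List Int) (i : Nat) : List Int := Lf.set i (Lf.getD i 0 + L.getD i 0)
def pvInner (L Lf : List Int) : List Int := (List.range L.length).foldl (pvStep L) Lf

def equalize_and_sum (L_L : List (List Int)) : List Int :=
  let max_length : Nat := (PySem.List.max? (L_L.map (fun L => L.length)) (fun x => x)).getD 0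
  let padded := L_L.map (fun L => L ++ List.replicate (max_length - L.length) (0 : Int))
  let L_final := List.replicate max_length (0 : Int)
  padded.foldl (fun Lf L => pvInner L Lf) L_final

-- ===== PORT B =====
-- B's helper 'add': swap so xs is the longer list, zip-add the overlap, keep xs's tail
def pvAdd (xs ys : List Int) : List Int :=
  if xs.length < ys.length then
    ((List.zip ys xs).map (fun p => p.1 + p.2)) ++ ys.drop xs.length
  else
    ((List.zip xs ys).map (fun p => p.1 + p.2)) ++ xs.drop ys.length

def equalize_and_sum_alt (L_L : List (List Int)) : List Int :=
  match L_L with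
  | [] => []          -- Python raises IndexError on L_L[0] here; excluded by Pre_
  | h :: t => t.foldl pvAdd h

-- ===== PRECONDITION & SPEC =====
-- Pre_ excludes only the empty outer list, on which both Pythons raise (A: ValueError from max, B: IndexError).
def Pre_equalize_and_sum (L_L : List (List Int)) : Prop := L_L ≠ []
instance (L_L : List (List Int)) : Decidable (Pre_equalize_and_sum L_L) := by unfold Pre_equalize_and_sum; infer_instance
def pvWitness_equalize_and_sum : List (List Int) := [[1, 2], [3]]

def Spec_equalize_and_sum (L_L : List (List Int)) (out : List Int) : Prop := out = equalize_and_sum_alt L_L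
instance (L_L : List (List Int)) (out : List Int) : Decidable (Spec_equalize_and_sum L_L out) := by unfold Spec_equalize_and_sum; infer_instance

-- ===== CLAIM =====
def Claim_equal_equalize_and_sum : Prop := ∀ (L_L : List (List Int)), Dom_equalize_and_sum L_L → Pre_equalize_and_sum L_L → Spec_equalize_and_sum L_L (equalize_and_sum L_L)

-- ===== LEMMAS AND PROOFS =====

-- A's inner loop preserves the length of L_final
theorem pv_inner_length (L : List Int) (n : Nat) (acc : List Int) :
    ((List.range n).foldl (pvStep L) acc).length = acc.length := by
  induction n generalizing acc with
  | zero => rfl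
  | succ n ih =>
    rw [List.range_succ, List.foldl_append]
    simp only [List.foldl_cons, List.foldl_nil, pvStep, List.length_set]
    exact ih acc

-- element-wise characterisation of A's inner loop
theorem pv_inner_getD (L : List Int) (n : Nat) (acc : List Int) (j : Nat) :
    ((List.range n).foldl (pvStep L) acc).getD j 0 =
      if j < n ∧ j < acc.length then acc.getD j 0 + L.getD j 0 else acc.getD j 0 := by
  induction n with
  | zero => simp
  | succ n ih =>
    rw [List.range_succ, List.foldl_append]
    simp only [List.foldl_cons, List.foldl_nil]
    have hplen := pv_inner_length L n acc
    rw [pvStep, List.getD_eq_getElem?_getD, List.getElem?_set]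
    by_cases hj : n = j
    · subst hj
      by_cases hlt : n < acc.length
      · rw [if_pos rfl, if_pos (by omega), Option.getD_some, ih,
            if_neg (by omega), if_pos (by omega)]
      · rw [if_pos rfl, if_neg (by omega), Option.getD_none, if_neg (by omega)]
        exact (List.getD_eq_default _ _ (by omega)).symm
    · rw [if_neg hj, ← List.getD_eq_getElem?_getD, ih]
      have h : (j < n + 1 ∧ j < acc.length) ↔ (j < n ∧ j < acc.length) := by omega
      simp only [h]

theorem pv_pvInner_length (L acc : List Int) : (pvInner L acc).length = acc.length :=
  pv_inner_length L L.length acc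

theorem pv_pvInner_getD (L acc : List Int) (j : Nat) :
    (pvInner L acc).getD j 0 =
      if j < L.length ∧ j < acc.length then acc.getD j 0 + L.getD j 0 else acc.getD j 0 :=
  pv_inner_getD L L.length acc j

-- A's outer loop preserves the length of L_final
theorem pv_outer_length (rows : List (List Int)) (acc : List Int) :
    (rows.foldl (fun Lf L => pvInner L Lf) acc).length = acc.length := by
  induction rows generalizing acc with
  | nil => rfl
  | cons r t ih => simp only [List.foldl_cons]; rw [ih, pv_pvInner_length]

-- A's outer loop computes, at every in-range index, the column sum added to the accumulator
theorem pv_outer_getD (rows : List (List Int)) (acc : List Int) (j : Nat) (hj : j < acc.length) :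
    (rows.foldl (fun Lf L => pvInner L Lf) acc).getD j 0 =
      acc.getD j 0 + (rows.map (fun r => r.getD j 0)).sum := by
  induction rows generalizing acc with
  | nil => simp
  | cons r t ih =>
    simp only [List.foldl_cons, List.map_cons, List.sum_cons]
    rw [ih _ (by rw [pv_pvInner_length]; exact hj), pv_pvInner_getD]
    by_cases hr : j < r.length
    · simp [hr, hj, add_assoc]
    · simp [hr]

-- padding with zeros does not change getD
theorem pv_pad_getD (L : List Int) (k j : Nat) :
    (L ++ List.replicate k (0 : Int)).getD j 0 = L.getD j 0 := by
  rcases lt_or_ge j L.length with h | h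
  · rw [List.getD_eq_getElem _ _ (by simp; omega), List.getElem_append_left h,
        List.getD_eq_getElem _ _ h]
  · rw [List.getD_eq_default _ _ h]
    rcases lt_or_ge j (L.length + k) with h2 | h2
    · rw [List.getD_eq_getElem _ _ (by simp; omega), List.getElem_append_right h]
      simp
    · exact List.getD_eq_default _ _ (by simp; omega)

-- B's add: the core case where ys is not longer than xs, element-wise
theorem pv_addCore_getD (xs : List Int) : ∀ (ys : List Int) (j : Nat), ys.length ≤ xs.length →
    (((List.zip xs ys).map (fun p => p.1 + p.2)) ++ xs.drop ys.length).getD j 0 =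
      xs.getD j 0 + ys.getD j 0 := by
  induction xs with
  | nil =>
    intro ys j h
    have : ys = [] := List.eq_nil_of_length_eq_zero (Nat.le_zero.mp (by simpa using h))
    subst this; simp
  | cons x xs ih =>
    intro ys j h
    cases ys with
    | nil => simp
    | cons y ys =>
      cases j with
      | zero => simp
      | succ j =>
        simp only [List.zip_cons_cons, List.map_cons, List.cons_append, List.getD_cons_succ]
        exact ih ys j (by simpa using h)

theorem pv_pvAdd_getD (xs ys : List Int) (j : Nat) :
    (pvAdd xs ys).getD j 0 = xs.getD j 0 + ys.getD j 0 := by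
  unfold pvAdd
  split
  · rw [pv_addCore_getD ys xs j (by omega)]; ring
  · exact pv_addCore_getD xs ys j (by omega)

theorem pv_pvAdd_length (xs ys : List Int) :
    (pvAdd xs ys).length = max xs.length ys.length := by
  unfold pvAdd
  split <;> simp <;> omega

-- B's fold: length is the running max of lengths
theorem pv_foldB_length (rows : List (List Int)) (acc : List Int) :
    (rows.foldl pvAdd acc).length = rows.foldl (fun n L => max n L.length) acc.length := by
  induction rows generalizing acc with
  | nil => rfl
  | cons r t ih => simp only [List.foldl_cons]; rw [ih, pv_pvAdd_length]

-- B's fold: element-wise it is the column sum added to the accumulator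
theorem pv_foldB_getD (rows : List (List Int)) (acc : List Int) (j : Nat) :
    (rows.foldl pvAdd acc).getD j 0 = acc.getD j 0 + (rows.map (fun r => r.getD j 0)).sum := by
  induction rows generalizing acc with
  | nil => simp
  | cons r t ih =>
    simp only [List.foldl_cons, List.map_cons, List.sum_cons]
    rw [ih, pv_pvAdd_getD, add_assoc]

-- ===== VERDICT =====
theorem equalize_and_sum_spec : Claim_equal_equalize_and_sum := by
  intro L_L _ hpre
  unfold Spec_equalize_and_sum
  cases L_L with
  | nil => exact absurd rfl hpre
  | cons h t =>
    unfold equalize_and_sum equalize_and_sum_alt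
    simp only [List.map_cons]
    rw [PySem.List.max?_id_cons, Option.getD_some]
    set ml : Nat := (t.map (fun L => L.length)).foldl max h.length with hml
    have hmlB : (t.foldl pvAdd h).length = ml := by
      rw [pv_foldB_length, hml, List.foldl_map]
    have hlenA :
        (((h ++ List.replicate (ml - h.length) (0 : Int)) ::
            t.map (fun L => L ++ List.replicate (ml - L.length) (0 : Int))).foldl
          (fun Lf L => pvInner L Lf) (List.replicate ml (0 : Int))).length = ml := by
      rw [pv_outer_length, List.length_replicate]
    apply List.ext_getElem
    · rw [hlenA, hmlB]
    · intro j h1 h2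
      have hj : j < ml := hlenA ▸ h1
      rw [← List.getD_eq_getElem _ 0 h1, ← List.getD_eq_getElem _ 0 h2,
          pv_outer_getD _ _ _ (by simpa using hj), pv_foldB_getD]
      have hcols : t.map ((fun r : List Int => r.getD j 0) ∘
            (fun L => L ++ List.replicate (ml - L.length) (0 : Int))) =
          t.map (fun r => r.getD j 0) :=
        List.map_congr_left (fun L _ => pv_pad_getD L _ j)
      simp only [List.map_cons, List.map_map, List.sum_cons, pv_pad_getD, hcols]
      simp [hj]
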